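-- pv_equiv track=rewrite | github.com/leonardoagg/Bioinformatics-Project | tests/test_2.py | get_inverted_index
-- ===== SOURCE A (Python) =====
-- def get_inverted_index(clusters, read_ids):
--
-- 	inverted_index = []
-- 	num_clusters = max(clusters) + 1
-- 	num_reads = len(read_ids)
--
-- 	for i in range(0, num_clusters):
-- 		col = []
-- 		for j in range(0, num_reads):
-- 			if (clusters[j] == i):
-- 				col.append(read_ids[j])
-- 		inverted_index.append(col)
--
-- 	return inverted_index
-- ===== SOURCE B (Python) =====
-- def get_inverted_index(clusters, read_ids):
--     num_clusters = max(clusters) + 1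
--     buckets = [[] for _ in range(num_clusters)]
--     for c, r in zip(clusters, read_ids):
--         if c >= 0:
--             buckets[c].append(r)
--     return buckets
-- ===== Notes on version B (the rewrite author's own statement) =====
-- stated objective: faster
-- what changed: Replaces the per-cluster rescans of the whole read list (one inner pass for every cluster id) by a single pass that buckets each read directly into its cluster's list.
import Mathlib
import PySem

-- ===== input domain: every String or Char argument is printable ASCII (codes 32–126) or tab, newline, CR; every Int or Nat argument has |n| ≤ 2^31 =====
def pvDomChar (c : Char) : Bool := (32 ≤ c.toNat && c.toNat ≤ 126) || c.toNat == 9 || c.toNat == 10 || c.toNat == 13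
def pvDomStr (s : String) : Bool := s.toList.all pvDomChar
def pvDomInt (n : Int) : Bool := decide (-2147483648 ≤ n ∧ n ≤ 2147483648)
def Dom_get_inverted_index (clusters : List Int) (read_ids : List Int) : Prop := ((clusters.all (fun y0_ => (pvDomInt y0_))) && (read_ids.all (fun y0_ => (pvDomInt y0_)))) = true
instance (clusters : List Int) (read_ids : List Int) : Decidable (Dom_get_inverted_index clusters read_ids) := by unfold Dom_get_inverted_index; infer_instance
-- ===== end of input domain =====

-- B replaces A's per-cluster rescans of the reads (O(C*N)) by one bucketing pass (O(N+C)).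
-- ===== PORT A =====
def get_inverted_index (clusters : List Int) (read_ids : List Int) : List (List Int) :=
  let num_clusters : Int := (PySem.List.max? clusters (fun x => x)).getD 0 + 1  -- max([]) raises: excluded by Pre_
  let num_reads : Int := read_ids.length
  (PySem.List.pyRange 0 num_clusters 1).foldl (fun inverted_index i =>
    let col := (PySem.List.pyRange 0 num_reads 1).foldl (fun col j =>
      if PySem.List.pyGetD clusters j 0 = i then col ++ [PySem.List.pyGetD read_ids j 0] else col) []
    inverted_index ++ [col]) []

-- ===== PORT B =====
def get_inverted_index_alt (clusters : List Int) (read_ids : List Int) : List (List Int) :=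
  let num_clusters : Int := (PySem.List.max? clusters (fun x => x)).getD 0 + 1  -- max([]) raises: outside Pre_
  let buckets : List (List Int) := List.replicate num_clusters.toNat []
  (clusters.zip read_ids).foldl (fun buckets p =>
    if 0 ≤ p.1 then
      PySem.List.pySetD buckets p.1 (PySem.List.pyGetD buckets p.1 [] ++ [p.2])
    else buckets) buckets

-- ===== PRECONDITION & SPEC =====
-- Pre_ excludes exactly the inputs where Python A raises: empty clusters (ValueError from max),
-- and read_ids longer than clusters when some cluster id is nonnegative (IndexError on clusters[j]).
def Pre_get_inverted_index (clusters : List Int) (read_ids : List Int) : Prop :=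
  clusters ≠ [] ∧ (clusters.any (fun c => decide (0 ≤ c)) = true → read_ids.length ≤ clusters.length)
instance (clusters : List Int) (read_ids : List Int) : Decidable (Pre_get_inverted_index clusters read_ids) := by unfold Pre_get_inverted_index; infer_instance
def pvWitness_get_inverted_index : List Int × List Int := ([0, 2, 0], [10, 20, 30])


def Spec_get_inverted_index (clusters : List Int) (read_ids : List Int) (out : List (List Int)) : Prop := out = get_inverted_index_alt clusters read_ids
instance (clusters : List Int) (read_ids : List Int) (out : List (List Int)) : Decidable (Spec_get_inverted_index clusters read_ids out) := by unfold Spec_get_inverted_index; infer_instance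

-- ===== CLAIM (what is proved, stated in full; the proofs are below) =====
def Claim_equal_get_inverted_index : Prop := ∀ (clusters : List Int) (read_ids : List Int), Dom_get_inverted_index clusters read_ids → Pre_get_inverted_index clusters read_ids → Spec_get_inverted_index clusters read_ids (get_inverted_index clusters read_ids)

-- ===== LEMMAS AND PROOFS =====

lemma pv_inner_take (clusters read_ids : List Int) (i : Int) (n : Nat)
    (hn : n ≤ read_ids.length) (hlen : read_ids.length ≤ clusters.length) (acc : List Int) :
    (PySem.List.pyRange 0 (n : Int) 1).foldl (fun col j =>
      if PySem.List.pyGetD clusters j 0 = i then col ++ [PySem.List.pyGetD read_ids j 0] else col) acc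
    = acc ++ (((clusters.zip read_ids).take n).filter (fun p => p.1 = i)).map (·.2) := by
  induction n generalizing acc with
  | zero => simp [PySem.List.pyRange_one_eq_nil]
  | succ n ih =>
    have hn' : n ≤ read_ids.length := Nat.le_of_succ_le hn
    have hnr : n < read_ids.length := hn
    have hnc : n < clusters.length := lt_of_lt_of_le hnr hlen
    have hsplit : PySem.List.pyRange 0 ((n + 1 : Nat) : Int) 1
        = PySem.List.pyRange 0 (n : Int) 1 ++ [(n : Int)] := by
      push_cast
      exact PySem.List.pyRange_one_succ_right (Int.natCast_nonneg n)
    rw [hsplit, List.foldl_append, ih hn']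
    have hzlen : n < (clusters.zip read_ids).length := by
      simp [List.length_zip]; omega
    have hztake : (clusters.zip read_ids).take (n + 1)
        = (clusters.zip read_ids).take n ++ [(clusters[n], read_ids[n])] := by
      rw [List.take_add_one]
      simp [List.getElem?_eq_getElem hzlen, List.getElem_zip]
    rw [hztake]
    simp only [List.foldl_cons, List.foldl_nil, List.filter_append, List.map_append,
      PySem.List.pyGetD_natCast, List.getD_eq_getElem clusters 0 hnc,
      List.getD_eq_getElem read_ids 0 hnr]
    by_cases hc : clusters[n] = i
    · simp [hc, List.append_assoc]
    · simp [hc]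

-- A's inner loop over j collects, left to right, the reads whose cluster equals i.
lemma pv_inner (clusters read_ids : List Int) (i : Int)
    (hlen : read_ids.length ≤ clusters.length) (acc : List Int) :
    (PySem.List.pyRange 0 (read_ids.length : Int) 1).foldl (fun col j =>
      if PySem.List.pyGetD clusters j 0 = i then col ++ [PySem.List.pyGetD read_ids j 0] else col) acc
    = acc ++ ((clusters.zip read_ids).filter (fun p => p.1 = i)).map (·.2) := by
  have h := pv_inner_take clusters read_ids i read_ids.length le_rfl hlen acc
  rwa [List.take_of_length_le (by rw [List.length_zip]; omega)] at h

-- B's bucketing loop, characterised pointwise.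
lemma pv_bfold (pairs : List (Int × Int)) (b : List (List Int))
    (hb : ∀ p ∈ pairs, p.1 < (b.length : Int)) :
    pairs.foldl (fun buckets p =>
      if 0 ≤ p.1 then
        PySem.List.pySetD buckets p.1 (PySem.List.pyGetD buckets p.1 [] ++ [p.2])
      else buckets) b
    = (List.range b.length).map (fun k => b.getD k [] ++ ((pairs.filter (fun p => p.1 = (k : Int))).map (·.2))) := by
  induction pairs generalizing b with
  | nil =>
    simp only [List.foldl_nil, List.filter_nil, List.map_nil, List.append_nil]
    apply List.ext_getElem
    · simp
    · intro k h1 h2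
      simp [List.getD_eq_getElem?_getD, List.getElem?_eq_getElem h1]
  | cons p rest ih =>
    obtain ⟨c, r⟩ := p
    simp only [List.foldl_cons]
    by_cases hc : 0 ≤ c
    · have hclt : c < (b.length : Int) := hb (c, r) List.mem_cons_self
      have hcn : c.toNat < b.length := by omega
      rw [if_pos hc, PySem.List.pySetD_of_nonneg _ _ hc,
        PySem.List.pyGetD_eq_getElem _ _ hc hclt]
      set b' := b.set c.toNat (b[c.toNat] ++ [r]) with hb'
      have hlen' : b'.length = b.length := by simp [hb']
      rw [ih b' (by intro q hq; rw [hlen']; exact hb q (List.mem_cons_of_mem _ hq)), hlen']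
      apply List.map_congr_left
      intro k hk
      have hkb : k < b.length := List.mem_range.mp hk
      by_cases hkc : k = c.toNat
      · have hci : c = (k : Int) := by omega
        have hgd : b'.getD k [] = b.getD k [] ++ [r] := by
          rw [List.getD_eq_getElem b' [] (by omega), List.getD_eq_getElem b [] hkb]
          simp [hb', hkc, List.getElem_set_self]
        rw [hgd]
        simp [hci, List.append_assoc]
      · have hci : ¬ (c = (k : Int)) := by omega
        have hcc : c.toNat ≠ k := fun h => hkc h.symm
        have hgd : b'.getD k [] = b.getD k [] := by
          rw [List.getD_eq_getElem b' [] (by omega), List.getD_eq_getElem b [] hkb]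
          simp [hb', hcc]
        rw [hgd]
        simp [hci]
    · rw [if_neg hc, ih b (fun q hq => hb q (List.mem_cons_of_mem _ hq))]
      apply List.map_congr_left
      intro k hk
      have hci : ¬ (c = (k : Int)) := by omega
      simp [hci]

-- ===== VERDICT (by name: the statement is the Claim_ definition above) =====
theorem get_inverted_index_spec : Claim_equal_get_inverted_index := by
  intro clusters read_ids _ hpre
  obtain ⟨hne, himp⟩ := hpre
  unfold Spec_get_inverted_index get_inverted_index get_inverted_index_alt
  cases hM : PySem.List.max? clusters (fun x => x) with
  | none => exact absurd ((PySem.List.max?_eq_none_iff _ _).mp hM) hne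
  | some M =>
    have hMmem : M ∈ clusters := PySem.List.max?_mem hM
    have hMmax : ∀ y ∈ clusters, y ≤ M := fun y hy => PySem.List.max?_isMax hM y hy
    simp only [Option.getD_some]
    have hbfold := pv_bfold (clusters.zip read_ids) (List.replicate (M + 1).toNat [])
      (by
        intro p hp
        have hmem : p.1 ∈ clusters := (List.of_mem_zip hp).1
        have := hMmax p.1 hmem
        simp only [List.length_replicate]
        omega)
    by_cases hpos : clusters.any (fun c => decide (0 ≤ c)) = true
    · have hlen := himp hpos
      have hM0 : 0 ≤ M := by
        obtain ⟨c, hc, hc0⟩ := List.any_eq_true.mp hpos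
        exact le_trans (of_decide_eq_true hc0) (hMmax c hc)
      have htn : (((M + 1).toNat : Int)) = M + 1 := by omega
      rw [hbfold]
      simp only [List.length_replicate]
      rw [PySem.List.pyRange_one 0 (M + 1)]
      simp only [List.foldl_map, PySem.List.foldl_append_singleton_eq_map, List.nil_append]
      have h1 : (M + 1 - 0).toNat = (M + 1).toNat := by omega
      rw [h1]
      apply List.map_congr_left
      intro k hk
      have hkm : k < (M + 1).toNat := List.mem_range.mp hk
      simp only [zero_add]
      rw [pv_inner clusters read_ids ((k : Int)) hlen []]
      rw [List.getD_replicate ([] : List Int) hkm]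
    · have hMneg : M < 0 := by
        by_contra h
        exact hpos (List.any_eq_true.mpr ⟨M, hMmem, decide_eq_true (by omega)⟩)
      have htz : (M + 1).toNat = 0 := by omega
      rw [hbfold, htz]
      rw [PySem.List.pyRange_one_eq_nil (a := 0) (b := M + 1) (by omega)]
      simp
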